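-- pv_equiv track=rewrite | github.com/MuMuJun97/vl_nav | dataset/process_multi_data.py | generate_data_indexs
-- ===== SOURCE A (Python) =====
-- def generate_data_indexs(data):
--     start_index = 0
--     end_index = 0
--     alldata = []
--     all_index = dict()
--     if 'r2r' in data.keys():
--         alldata += data['r2r']
--         end_index += len(data['r2r'])
--         all_index.update({i: 'r2r' for i in range(end_index)})
--         start_index += len(data['r2r'])
--     if 'reverie' in data.keys():
--         alldata += data['reverie']
--         end_index += len(data['reverie'])
--         all_index.update({i: 'reverie' for i in range(start_index, end_index)})
--         start_index += len(data['reverie'])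
--     if 'soon' in data.keys():
--         alldata += data['soon']
--         end_index += len(data['soon'])
--         all_index.update({i: 'soon' for i in range(start_index, end_index)})
--         start_index += len(data['soon'])
--     if 'fr2r' in data.keys():
--         alldata += data['fr2r']
--         end_index += len(data['fr2r'])
--         all_index.update({i: 'fr2r' for i in range(start_index, end_index)})
--         start_index += len(data['fr2r'])
--     if 'eqa' in data.keys():
--         alldata += data['eqa']
--         end_index += len(data['eqa'])
--         all_index.update({i: 'eqa' for i in range(start_index, end_index)})
--         start_index += len(data['eqa'])
--     if 'cvdn' in data.keys():
--         alldata += data['cvdn']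
--         end_index += len(data['cvdn'])
--         all_index.update({i: 'cvdn' for i in range(start_index, end_index)})
--     return alldata, all_index
-- ===== SOURCE B (Python) =====
-- def generate_data_indexs(data):
--     def go(keys, offset):
--         if not keys:
--             return [], {}
--         key, rest = keys[0], keys[1:]
--         if key not in data:
--             return go(rest, offset)
--         vals = data[key]
--         rest_data, rest_index = go(rest, offset + len(vals))
--         index = {i: key for i in range(offset, offset + len(vals))}
--         index.update(rest_index)
--         return vals + rest_data, index
--     return go(['r2r', 'reverie', 'soon', 'fr2r', 'eqa', 'cvdn'], 0)
-- ===== Notes on version B (the rewrite author's own statement) =====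
-- stated objective: alternative
-- what changed: Replaces A's six copy-pasted if-blocks with mutable start/end cursors and in-place dict updates by a recursive descent over the fixed key list that threads the offset as an argument and assembles both the data list and the index dict back-to-front from the recursive tail results.
import Mathlib
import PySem

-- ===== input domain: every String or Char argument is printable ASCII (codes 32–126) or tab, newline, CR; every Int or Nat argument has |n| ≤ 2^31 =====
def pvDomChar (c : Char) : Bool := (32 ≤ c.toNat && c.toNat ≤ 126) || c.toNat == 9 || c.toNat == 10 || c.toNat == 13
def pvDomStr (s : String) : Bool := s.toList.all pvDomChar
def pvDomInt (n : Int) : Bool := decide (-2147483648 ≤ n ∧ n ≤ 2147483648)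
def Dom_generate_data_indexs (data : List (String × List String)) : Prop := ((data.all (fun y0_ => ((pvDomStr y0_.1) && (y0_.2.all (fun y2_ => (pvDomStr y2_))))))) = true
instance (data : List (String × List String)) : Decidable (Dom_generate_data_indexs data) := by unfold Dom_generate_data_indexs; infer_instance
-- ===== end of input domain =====

-- B replaces A's six copy-pasted if-blocks with mutable start/end cursors and in-place dict
-- updates by a recursive descent over the fixed key list that threads the offset as an
-- argument and assembles data list and index dict from the recursive tail results; same value.

-- ===== PORT A =====
-- One if-block of A (all six are textually identical up to the key): state is
-- (alldata, start_index, end_index, all_index). A's first block writes range(end_index),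
-- which equals range(start_index, end_index) there since start_index = 0, and A's last
-- block omits the final 'start_index += …', which only changes dead state.
def pvBlockA (data : List (String × List String)) (key : String)
    (st : List String × Int × Int × PySem.Dict Int String) :
    List String × Int × Int × PySem.Dict Int String :=
  let dd := PySem.Dict.mk data
  if dd.contains key then
    let v := dd.getD key []
    let alldata := st.1 ++ v
    let end_index := st.2.2.1 + (v.length : Int)
    let all_index := st.2.2.2.update
      ((PySem.List.pyRange st.2.1 end_index).map (fun i => (i, key)))
    (alldata, st.2.1 + (v.length : Int), end_index, all_index)
  else st

def generate_data_indexs (data : List (String × List String)) :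
    List String × (List (Int × String)) :=
  let s0 := (([] : List String), (0 : Int), (0 : Int),
             (PySem.Dict.empty : PySem.Dict Int String))
  let s1 := pvBlockA data "r2r" s0
  let s2 := pvBlockA data "reverie" s1
  let s3 := pvBlockA data "soon" s2
  let s4 := pvBlockA data "fr2r" s3
  let s5 := pvBlockA data "eqa" s4
  let s6 := pvBlockA data "cvdn" s5
  (s6.1, s6.2.2.2.items)

-- ===== PORT B =====
-- the inner recursive 'go(keys, offset)' of Source B
def pvGoB (data : List (String × List String)) :
    List String → Int → List String × PySem.Dict Int String
  | [], _ => ([], PySem.Dict.empty)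
  | key :: rest, offset =>
    let dd := PySem.Dict.mk data
    if dd.contains key then
      let vals := dd.getD key []
      let r := pvGoB data rest (offset + (vals.length : Int))
      let index : PySem.Dict Int String :=
        PySem.Dict.mk
          ((PySem.List.pyRange offset (offset + (vals.length : Int))).map (fun i => (i, key)))
      (vals ++ r.1, index.update r.2.items)
    else pvGoB data rest offset

def generate_data_indexs_alt (data : List (String × List String)) :
    List String × (List (Int × String)) :=
  let r := pvGoB data ["r2r", "reverie", "soon", "fr2r", "eqa", "cvdn"] 0
  (r.1, r.2.items)

-- ===== PRECONDITION & SPEC =====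
def Spec_generate_data_indexs (data : List (String × List String)) (out : List String × (List (Int × String))) : Prop := out = generate_data_indexs_alt data
instance (data : List (String × List String)) (out : List String × (List (Int × String))) : Decidable (Spec_generate_data_indexs data out) := by unfold Spec_generate_data_indexs; infer_instance

-- ===== CLAIM (what is proved, stated in full; the proofs are below) =====
def Claim_equal_generate_data_indexs : Prop := ∀ (data : List (String × List String)), Dom_generate_data_indexs data → Spec_generate_data_indexs data (generate_data_indexs data)

-- ===== LEMMAS AND PROOFS =====

-- the concatenated data of the present keys, and the parallel per-element source labels
def pvCat (data : List (String × List String)) : List String → List String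
  | [] => []
  | k :: r =>
    if (PySem.Dict.mk data).contains k
    then (PySem.Dict.mk data).getD k [] ++ pvCat data r else pvCat data r

def pvSrcs (data : List (String × List String)) : List String → List String
  | [] => []
  | k :: r =>
    if (PySem.Dict.mk data).contains k
    then List.replicate ((PySem.Dict.mk data).getD k []).length k ++ pvSrcs data r
    else pvSrcs data r

-- enumerating m copies of x from s is the range s..s+m paired with x
theorem pv_enum_replicate (m : Nat) (s : Int) (x : String) :
    PySem.List.enumerate (List.replicate m x) s
      = (PySem.List.pyRange s (s + (m : Int))).map (fun i => (i, x)) := by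
  induction m generalizing s with
  | zero => simp [PySem.List.enumerate_nil, PySem.List.pyRange_one_eq_nil]
  | succ k ih =>
    have harith : s + ((k + 1 : Nat) : Int) = (s + 1) + (k : Int) := by push_cast; ring
    rw [List.replicate_succ, PySem.List.enumerate_cons, harith,
        PySem.List.pyRange_one_cons (by omega : s < (s + 1) + (k : Int))]
    simp only [List.map_cons, ih (s + 1)]

-- a dict whose items are 'enumerate src 0', updated with the fresh range keys of one block,
-- has items 'enumerate (src ++ replicate m key) 0'
theorem pv_update_items (src : List String) (key : String) (m : Nat) :
    ((PySem.Dict.mk (PySem.List.enumerate src 0) : PySem.Dict Int String).update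
        ((PySem.List.pyRange (src.length : Int) ((src.length : Int) + (m : Int))).map
          (fun i => (i, key)))).items
      = PySem.List.enumerate (src ++ List.replicate m key) 0 := by
  have hupd : ∀ (d : PySem.Dict Int String) (l : List (Int × String)),
      d.update l = l.foldl (fun d p => d.insert p.1 p.2) d := fun _ _ => rfl
  rw [hupd, PySem.Dict.items_foldl_insert_fresh _ Prod.fst Prod.snd]
  · have hmk : (PySem.Dict.mk (PySem.List.enumerate src 0) : PySem.Dict Int String).items
        = PySem.List.enumerate src 0 := rfl
    rw [hmk, PySem.List.enumerate_append, pv_enum_replicate]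
    simp
  · intro a ha
    simp only [List.mem_map] at ha
    obtain ⟨i, hi, rfl⟩ := ha
    rw [PySem.List.mem_pyRange_one] at hi
    rw [PySem.Dict.contains_eq_decide_mem_keys]
    have hk : (PySem.Dict.mk (PySem.List.enumerate src 0) : PySem.Dict Int String).keys
        = PySem.List.pyRange 0 ((src.length : Int)) := by
      have h2 := PySem.List.map_fst_enumerate src 0
      simpa [PySem.Dict.keys] using h2
    rw [hk]
    simp only [decide_eq_false_iff_not, PySem.List.mem_pyRange_one]
    omega
  · have h3 : (List.map Prod.fst
        ((PySem.List.pyRange (src.length : Int) ((src.length : Int) + (m : Int))).map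
          (fun i => (i, key))))
        = PySem.List.pyRange (src.length : Int) ((src.length : Int) + (m : Int)) := by
      simp [Function.comp_def]
    rw [h3]
    exact PySem.List.nodup_pyRange_one _ _

-- loop invariant for A: running A's blocks over any key list from state
-- (al, |src|, |src|, dict-of-enumerate src) appends pvCat/pvSrcs of the key list
theorem pv_loopA (data : List (String × List String)) (KS : List String) :
    ∀ (al src : List String),
      KS.foldl (fun st k => pvBlockA data k st)
          (al, (src.length : Int), (src.length : Int),
           (PySem.Dict.mk (PySem.List.enumerate src 0) : PySem.Dict Int String))
        = (al ++ pvCat data KS, (((src ++ pvSrcs data KS).length : Int)),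
           (((src ++ pvSrcs data KS).length : Int)),
           (PySem.Dict.mk (PySem.List.enumerate (src ++ pvSrcs data KS) 0)
            : PySem.Dict Int String)) := by
  induction KS with
  | nil => intro al src; simp [pvCat, pvSrcs]
  | cons k ks ih =>
    intro al src
    simp only [List.foldl_cons]
    by_cases h : (PySem.Dict.mk data).contains k = true
    · have hA : pvBlockA data k
          (al, (src.length : Int), (src.length : Int),
           (PySem.Dict.mk (PySem.List.enumerate src 0) : PySem.Dict Int String))
          = (al ++ (PySem.Dict.mk data).getD k [],
             ((src ++ List.replicate ((PySem.Dict.mk data).getD k []).length k).length : Int),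
             ((src ++ List.replicate ((PySem.Dict.mk data).getD k []).length k).length : Int),
             (PySem.Dict.mk (PySem.List.enumerate
               (src ++ List.replicate ((PySem.Dict.mk data).getD k []).length k) 0)
              : PySem.Dict Int String)) := by
        simp only [pvBlockA, h, if_true, Prod.mk.injEq, List.length_append,
          List.length_replicate, Nat.cast_add, true_and]
        apply PySem.Dict.ext
        rw [pv_update_items]
      rw [hA, ih]
      simp [pvCat, pvSrcs, h, List.append_assoc]
    · have h' : (PySem.Dict.mk data).contains k = false := by
        simp only [Bool.not_eq_true] at h; exact h
      have hA : pvBlockA data k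
          (al, (src.length : Int), (src.length : Int),
           (PySem.Dict.mk (PySem.List.enumerate src 0) : PySem.Dict Int String))
          = (al, (src.length : Int), (src.length : Int),
             (PySem.Dict.mk (PySem.List.enumerate src 0) : PySem.Dict Int String)) := by
        simp only [pvBlockA, h', Bool.false_eq_true, if_false]
      rw [hA, ih]
      simp [pvCat, pvSrcs, h']
  
-- characterisation of B's recursion: first component is the concatenation, the dict's
-- items are the sources enumerated from the threaded offset
theorem pv_goB (data : List (String × List String)) :
    ∀ (KS : List String) (off : Int),
      (pvGoB data KS off).1 = pvCat data KS ∧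
      (pvGoB data KS off).2.items = PySem.List.enumerate (pvSrcs data KS) off := by
  intro KS
  induction KS with
  | nil => intro off; exact ⟨rfl, rfl⟩
  | cons k ks ih =>
    intro off
    by_cases h : (PySem.Dict.mk data).contains k = true
    · have hg : pvGoB data (k :: ks) off
          = (((PySem.Dict.mk data).getD k []) ++ (pvGoB data ks (off + (((PySem.Dict.mk data).getD k []).length : Int))).1,
             (PySem.Dict.mk
                ((PySem.List.pyRange off (off + (((PySem.Dict.mk data).getD k []).length : Int))).map
                  (fun i => (i, k))) : PySem.Dict Int String).update
               (pvGoB data ks (off + (((PySem.Dict.mk data).getD k []).length : Int))).2.items) := by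
        simp only [pvGoB, h, if_true]
      obtain ⟨ih1, ih2⟩ := ih (off + (((PySem.Dict.mk data).getD k []).length : Int))
      constructor
      · rw [hg]
        simp only [pvCat, h, if_true, ih1]
      · rw [hg]
        set m := ((PySem.Dict.mk data).getD k []).length with hm
        have hupd : ∀ (d : PySem.Dict Int String) (l : List (Int × String)),
            d.update l = l.foldl (fun d p => d.insert p.1 p.2) d := fun _ _ => rfl
        simp only [ih2, hupd]
        rw [PySem.Dict.items_foldl_insert_fresh _ Prod.fst Prod.snd]
        · have hmk : (PySem.Dict.mk
              ((PySem.List.pyRange off (off + (m : Int))).map (fun i => (i, k)))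
              : PySem.Dict Int String).items
              = (PySem.List.pyRange off (off + (m : Int))).map (fun i => (i, k)) := rfl
          rw [hmk]
          simp only [pvSrcs, h, if_true]
          rw [PySem.List.enumerate_append, pv_enum_replicate]
          simp [hm]
        · intro a ha
          have haf : a.1 ∈ List.map Prod.fst (PySem.List.enumerate (pvSrcs data ks) (off + (m : Int))) :=
            List.mem_map_of_mem ha
          rw [show (List.map Prod.fst (PySem.List.enumerate (pvSrcs data ks) (off + (m : Int))))
                = List.map (·.1) (PySem.List.enumerate (pvSrcs data ks) (off + (m : Int))) from rfl,
              PySem.List.map_fst_enumerate, PySem.List.mem_pyRange_one] at haf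
          rw [PySem.Dict.contains_eq_decide_mem_keys]
          have hk : (PySem.Dict.mk
              ((PySem.List.pyRange off (off + (m : Int))).map (fun i => (i, k)))
              : PySem.Dict Int String).keys
              = PySem.List.pyRange off (off + (m : Int)) := by
            simp [PySem.Dict.keys, Function.comp_def]
          rw [hk]
          simp only [decide_eq_false_iff_not, PySem.List.mem_pyRange_one]
          omega
        · rw [show (List.map Prod.fst (PySem.List.enumerate (pvSrcs data ks) (off + (m : Int))))
                = List.map (·.1) (PySem.List.enumerate (pvSrcs data ks) (off + (m : Int))) from rfl,
              PySem.List.map_fst_enumerate]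
          exact PySem.List.nodup_pyRange_one _ _
    · have h' : (PySem.Dict.mk data).contains k = false := by
        simp only [Bool.not_eq_true] at h; exact h
      have hg : pvGoB data (k :: ks) off = pvGoB data ks off := by
        simp only [pvGoB, h', Bool.false_eq_true, if_false]
      obtain ⟨ih1, ih2⟩ := ih off
      rw [hg]
      simp [pvCat, pvSrcs, h', ih1, ih2]

-- ===== VERDICT (by name: the statement is the Claim_ definition above) =====
theorem generate_data_indexs_spec : Claim_equal_generate_data_indexs := by
  intro data _
  show generate_data_indexs data = generate_data_indexs_alt data
  have hA : generate_data_indexs data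
      = (let s6 := ["r2r", "reverie", "soon", "fr2r", "eqa", "cvdn"].foldl
            (fun st k => pvBlockA data k st)
            (([] : List String), (([] : List String).length : Int),
             (([] : List String).length : Int),
             (PySem.Dict.mk (PySem.List.enumerate ([] : List String) 0)
              : PySem.Dict Int String));
         (s6.1, s6.2.2.2.items)) := rfl
  rw [hA]
  simp only [pv_loopA data _ [] []]
  obtain ⟨h1, h2⟩ := pv_goB data ["r2r", "reverie", "soon", "fr2r", "eqa", "cvdn"] 0
  rw [generate_data_indexs_alt]
  simp only [h1, h2, List.nil_append]
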